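-- pv_equiv track=rewrite | github.com/Szpuntel/old_study_programs | Python_practice/bubble_sorting.py | sortowanieBombelkowe
-- ===== SOURCE A (Python) =====
-- def sortowanieBombelkowe(lista):
--     n = len(lista)
--     zamien = False
--     while n > 1:
--
--         for l in range(0, len(lista)-1):
--             if lista[l]%2 !=0 and lista[l+1]%2 !=0:
--                 if lista[l] > lista [l+1]:
--                     lista[l], lista[l+1] = lista [l+1], lista[l]
--                     zamien = True
--
--         n -= 1
--         if zamien == False: break
--
--     return lista
-- ===== SOURCE B (Python) =====
-- def sortowanieBombelkowe(lista):
--     # One pass: sort each maximal run of consecutive odd numbers, keep evens in place.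
--     # (Return value only: A mutates lista in place, B builds a new list.)
--     out = []
--     run = []
--     for x in lista:
--         if x % 2 != 0:
--             run.append(x)
--         else:
--             out.extend(sorted(run))
--             run = []
--             out.append(x)
--     out.extend(sorted(run))
--     return out
-- ===== Notes on version B (the rewrite author's own statement) =====
-- stated objective: faster
-- what changed: Replaced the O(n^2) repeated adjacent-swap passes (which only ever swap two odd neighbours) by a single pass that sorts each maximal run of consecutive odd numbers and keeps even numbers in place.
import Mathlib
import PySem

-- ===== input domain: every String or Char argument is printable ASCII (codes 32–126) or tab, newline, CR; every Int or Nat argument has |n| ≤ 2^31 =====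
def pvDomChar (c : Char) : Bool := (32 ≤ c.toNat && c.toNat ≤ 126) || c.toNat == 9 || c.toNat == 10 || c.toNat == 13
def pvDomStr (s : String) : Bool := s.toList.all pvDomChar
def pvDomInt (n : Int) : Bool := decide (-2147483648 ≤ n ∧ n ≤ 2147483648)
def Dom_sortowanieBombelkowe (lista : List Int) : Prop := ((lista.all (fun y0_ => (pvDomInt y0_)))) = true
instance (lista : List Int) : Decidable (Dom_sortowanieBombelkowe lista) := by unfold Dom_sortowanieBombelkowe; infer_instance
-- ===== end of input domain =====

-- B replaces A's repeated adjacent-swap passes by one pass that sorts each maximal run of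
-- consecutive odd numbers (objective: faster). Return value only: Python A mutates its
-- argument in place, Python B builds a fresh list.

-- ===== PORT A =====
-- one body of A's for-loop: compare positions l and l+1, swap if both odd and out of order
def pvStepA (st : List Int × Bool) (l : Int) : List Int × Bool :=
  let a := PySem.List.pyGetD st.1 l 0
  let b := PySem.List.pyGetD st.1 (l + 1) 0
  if PySem.Int.mod a 2 ≠ 0 ∧ PySem.Int.mod b 2 ≠ 0 then
    if a > b then
      (PySem.List.pySetD (PySem.List.pySetD st.1 l b) (l + 1) a, true)
    else st
  else st

-- A's inner for-loop: for l in range(0, len(lista)-1)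
def pvPassA (lista : List Int) (zamien : Bool) : List Int × Bool :=
  (PySem.List.pyRange 0 ((lista.length : Int) - 1) 1).foldl pvStepA (lista, zamien)

-- A's while-loop: n starts at len(lista), decremented each pass; break once zamien is still False
def pvWhileA : Nat → List Int → Bool → List Int
  | 0, lista, _ => lista
  | 1, lista, _ => lista
  | n + 2, lista, zamien =>
      let p := pvPassA lista zamien
      if p.2 = false then p.1 else pvWhileA (n + 1) p.1 p.2

def sortowanieBombelkowe (lista : List Int) : List Int :=
  pvWhileA lista.length lista false

-- ===== PORT B =====
-- body of B's single for-loop: odd x extends the current run, even x flushes sorted(run) and x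
def pvStepB (st : List Int × List Int) (x : Int) : List Int × List Int :=
  if PySem.Int.mod x 2 ≠ 0 then (st.1, st.2 ++ [x])
  else (st.1 ++ PySem.List.sorted st.2 (fun y => y) ++ [x], [])

def sortowanieBombelkowe_alt (lista : List Int) : List Int :=
  let st := lista.foldl pvStepB ([], [])
  st.1 ++ PySem.List.sorted st.2 (fun y => y)

-- ===== PRECONDITION & SPEC =====
def Spec_sortowanieBombelkowe (lista : List Int) (out : List Int) : Prop := out = sortowanieBombelkowe_alt lista
instance (lista : List Int) (out : List Int) : Decidable (Spec_sortowanieBombelkowe lista out) := by unfold Spec_sortowanieBombelkowe; infer_instance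

-- ===== CLAIM (what is proved, stated in full; the proofs are below) =====
def Claim_equal_sortowanieBombelkowe : Prop := ∀ (lista : List Int), Dom_sortowanieBombelkowe lista → Spec_sortowanieBombelkowe lista (sortowanieBombelkowe lista)

-- ===== LEMMAS AND PROOFS =====

-- structural version of one of A's passes (list result, "a swap happened" flag)
def spass : List Int → List Int × Bool
  | [] => ([], false)
  | [a] => ([a], false)
  | a :: b :: t =>
    if PySem.Int.mod a 2 ≠ 0 ∧ PySem.Int.mod b 2 ≠ 0 ∧ a > b then
      (b :: (spass (a :: t)).1, true)
    else
      (a :: (spass (b :: t)).1, (spass (b :: t)).2)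
termination_by l => l.length

-- the list part of one pass
def sp (l : List Int) : List Int := (spass l).1

-- canonical form: sort each maximal run of consecutive odds, evens fixed
def canon : List Int → List Int
  | [] => []
  | x :: t =>
    if PySem.Int.mod x 2 ≠ 0 then
      PySem.List.sorted (x :: t.takeWhile (fun y => decide (PySem.Int.mod y 2 ≠ 0))) (fun y => y)
        ++ canon (t.dropWhile (fun y => decide (PySem.Int.mod y 2 ≠ 0)))
    else x :: canon t
termination_by l => l.length
decreasing_by
  · simp only [List.length_cons]
    exact Nat.lt_succ_of_le (List.length_dropWhile_le _ _)
  · simp only [List.length_cons]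
    omega

-- ---- indexed pass = structural pass ----

lemma stepA_cons (n : Nat) (x : Int) (xs : List Int) (z : Bool) :
    pvStepA (x :: xs, z) ((n : Int) + 1)
      = (x :: (pvStepA (xs, z) (n : Int)).1, (pvStepA (xs, z) (n : Int)).2) := by
  simp only [pvStepA, ← Nat.cast_add_one, PySem.List.pyGetD_natCast,
    PySem.List.pySetD_natCast, List.getD_cons_succ, List.set_cons_succ]
  split_ifs <;> rfl

lemma stepA_zero (a b : Int) (t : List Int) (z : Bool) :
    pvStepA (a :: b :: t, z) 0 =
      if PySem.Int.mod a 2 ≠ 0 ∧ PySem.Int.mod b 2 ≠ 0 then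
        (if a > b then (b :: a :: t, true) else (a :: b :: t, z))
      else (a :: b :: t, z) := by
  have hb : PySem.List.pyGetD (a :: b :: t) ((0 : Int) + 1) 0 = b := by
    have : ((0 : Int) + 1) = ((1 : Nat) : Int) := by norm_num
    rw [this, PySem.List.pyGetD_natCast]; rfl
  have hset : PySem.List.pySetD (PySem.List.pySetD (a :: b :: t) 0 b) ((0 : Int) + 1) a
      = b :: a :: t := by
    rw [PySem.List.pySetD_of_nonneg _ _ (by omega)]
    rw [PySem.List.pySetD_of_nonneg _ _ (by omega)]
    rfl
  simp only [pvStepA, PySem.List.pyGetD_zero_cons, hb, hset]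

lemma foldA_shift (m : Nat) : ∀ (n : Nat) (x : Int) (xs : List Int) (z : Bool),
    (PySem.List.pyRange ((n : Int) + 1) (((n + m : Nat) : Int) + 1) 1).foldl pvStepA (x :: xs, z)
      = (x :: ((PySem.List.pyRange (n : Int) ((n + m : Nat) : Int) 1).foldl pvStepA (xs, z)).1,
         ((PySem.List.pyRange (n : Int) ((n + m : Nat) : Int) 1).foldl pvStepA (xs, z)).2) := by
  induction m with
  | zero =>
      intro n x xs z
      rw [PySem.List.pyRange_one_eq_nil (by push_cast; omega),
          PySem.List.pyRange_one_eq_nil (by push_cast; omega)]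
      rfl
  | succ m ih =>
      intro n x xs z
      rw [PySem.List.pyRange_one_cons (a := (n : Int) + 1) (by push_cast; omega)]
      rw [PySem.List.pyRange_one_cons (a := (n : Int)) (by push_cast; omega)]
      simp only [List.foldl_cons]
      rw [stepA_cons]
      have e1 : ((n : Int) + 1 + 1) = (((n + 1 : Nat) : Int) + 1) := by push_cast; ring
      have e2 : (((n + (m + 1) : Nat)) : Int) + 1 = (((n + 1) + m : Nat) : Int) + 1 := by
        push_cast; ring
      have e3 : ((n : Int) + 1) = (((n + 1 : Nat)) : Int) := by push_cast; ring
      have e4 : (((n + (m + 1) : Nat)) : Int) = (((n + 1) + m : Nat) : Int) := by push_cast; ring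
      rw [e1, e2, e3, e4, ih]

lemma passA_expand (l : List Int) (z : Bool) :
    pvPassA l z = (PySem.List.pyRange 0 ((l.length : Int) - 1) 1).foldl pvStepA (l, z) := rfl

lemma foldA_one (m : Nat) (x : Int) (xs : List Int) (z : Bool) :
    (PySem.List.pyRange 1 (((m + 1 : Nat)) : Int) 1).foldl pvStepA (x :: xs, z)
      = (x :: ((PySem.List.pyRange 0 ((m : Nat) : Int) 1).foldl pvStepA (xs, z)).1,
         ((PySem.List.pyRange 0 ((m : Nat) : Int) 1).foldl pvStepA (xs, z)).2) := by
  have h := foldA_shift m 0 x xs z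
  have e1 : (((0 : Nat) : Int)) + 1 = 1 := by norm_num
  have e2 : (((0 + m : Nat)) : Int) + 1 = (((m + 1 : Nat)) : Int) := by push_cast; ring
  have e3 : (((0 : Nat)) : Int) = 0 := by norm_num
  have e4 : (((0 + m : Nat)) : Int) = ((m : Nat) : Int) := by push_cast; ring
  rw [e1, e2, e3, e4] at h
  exact h

lemma passA_eq (l : List Int) : ∀ (z : Bool), pvPassA l z = ((spass l).1, z || (spass l).2) := by
  induction l using spass.induct with
  | case1 =>
      intro z
      rw [passA_expand, show ((([] : List Int).length : Int) - 1) = -1 from by simp,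
          PySem.List.pyRange_one_eq_nil (by omega)]
      simp [spass]
  | case2 a =>
      intro z
      rw [passA_expand, show ((([a] : List Int).length : Int) - 1) = 0 from by simp,
          PySem.List.pyRange_one_eq_nil (le_refl 0)]
      simp [spass]
  | case3 a b t hcond ih =>
      intro z
      have hb : ((((a :: b :: t).length : Int)) - 1) = (((t.length + 1 : Nat)) : Int) := by
        push_cast [List.length_cons]; ring
      rw [passA_expand, hb, PySem.List.pyRange_one_cons (by push_cast; omega)]
      simp only [List.foldl_cons]
      rw [stepA_zero, if_pos ⟨hcond.1, hcond.2.1⟩, if_pos hcond.2.2]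
      rw [show (0 : Int) + 1 = 1 from by norm_num]
      rw [foldA_one]
      rw [show ((t.length : Nat) : Int) = (((a :: t).length : Int)) - 1 from by
        push_cast [List.length_cons]; ring]
      rw [← passA_expand, ih]
      rw [spass, if_pos hcond]
      simp
  | case4 a b t hcond ih =>
      intro z
      have hb : ((((a :: b :: t).length : Int)) - 1) = (((t.length + 1 : Nat)) : Int) := by
        push_cast [List.length_cons]; ring
      rw [passA_expand, hb, PySem.List.pyRange_one_cons (by push_cast; omega)]
      simp only [List.foldl_cons]
      rw [stepA_zero]
      have hstate :
          (if PySem.Int.mod a 2 ≠ 0 ∧ PySem.Int.mod b 2 ≠ 0 then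
            (if a > b then (b :: a :: t, true) else (a :: b :: t, z))
          else (a :: b :: t, z)) = (a :: b :: t, z) := by
        split_ifs with h1 h2
        · exact absurd ⟨h1.1, h1.2, h2⟩ hcond
        · rfl
        · rfl
      rw [hstate]
      rw [show (0 : Int) + 1 = 1 from by norm_num]
      rw [foldA_one]
      rw [show ((t.length : Nat) : Int) = (((b :: t).length : Int)) - 1 from by
        push_cast [List.length_cons]; ring]
      rw [← passA_expand, ih]
      rw [spass, if_neg hcond]

-- ---- basic spass facts ----

lemma sp_nil : sp [] = [] := by simp [sp, spass]

lemma sp_single (a : Int) : sp [a] = [a] := by simp [sp, spass]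

lemma spass_perm (l : List Int) : (spass l).1.Perm l := by
  induction l using spass.induct with
  | case1 => simp [spass]
  | case2 a => simp [spass]
  | case3 a b t hcond ih =>
      rw [spass, if_pos hcond]
      exact (List.Perm.cons b ih).trans (List.Perm.swap a b t)
  | case4 a b t hcond ih =>
      rw [spass, if_neg hcond]
      exact List.Perm.cons a ih

lemma spass_noswap (l : List Int) (h : (spass l).2 = false) : (spass l).1 = l := by
  induction l using spass.induct with
  | case1 => simp [spass]
  | case2 a => simp [spass]
  | case3 a b t hcond ih =>
      rw [spass, if_pos hcond] at h
      simp at h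
  | case4 a b t hcond ih =>
      rw [spass, if_neg hcond] at h ⊢
      simp only at h ⊢
      rw [ih h]

lemma sp_even_head (x : Int) (t : List Int) (hx : PySem.Int.mod x 2 = 0) :
    sp (x :: t) = x :: sp t := by
  cases t with
  | nil => simp [sp, spass]
  | cons b t' =>
      rw [sp, spass, if_neg (fun h => h.1 hx)]
      rfl

lemma sp_append_even : ∀ (xs : List Int), ∀ (rest : List Int),
    (∀ x ∈ xs, PySem.Int.mod x 2 ≠ 0) →
    (∀ e t', rest = e :: t' → PySem.Int.mod e 2 = 0) →
    sp (xs ++ rest) = sp xs ++ sp rest := by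
  intro xs
  induction xs using spass.induct with
  | case1 => intro rest _ _; simp [sp, spass]
  | case2 a =>
      intro rest hxs hr
      cases rest with
      | nil => simp [sp, spass]
      | cons e t' =>
          have he : PySem.Int.mod e 2 = 0 := hr e t' rfl
          show sp (a :: e :: t') = sp [a] ++ sp (e :: t')
          rw [sp, spass, if_neg (fun h => h.2.1 he)]
          simp [sp, spass]
  | case3 a b t hcond ih =>
      intro rest hxs hr
      show sp (a :: b :: (t ++ rest)) = sp (a :: b :: t) ++ sp rest
      rw [sp, spass, if_pos hcond, sp, spass, if_pos hcond]
      have ihh := ih rest (fun x hx => hxs x (by simp at hx ⊢; tauto)) hr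
      simp only [sp] at ihh ⊢
      rw [List.cons_append] at ihh ⊢
      rw [ihh]
  | case4 a b t hcond ih =>
      intro rest hxs hr
      show sp (a :: b :: (t ++ rest)) = sp (a :: b :: t) ++ sp rest
      rw [sp, spass, if_neg hcond, sp, spass, if_neg hcond]
      have ihh := ih rest (fun x hx => hxs x (by simp at hx ⊢; tauto)) hr
      simp only [sp] at ihh ⊢
      rw [List.cons_append] at ihh ⊢
      rw [ihh]

lemma sp_append_max : ∀ (zs : List Int) (m : Int),
    (∀ x ∈ zs, x ≤ m) → sp (zs ++ [m]) = sp zs ++ [m] := by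
  intro zs
  induction zs using spass.induct with
  | case1 => intro m _; simp [sp, spass]
  | case2 a =>
      intro m hle
      show sp [a, m] = sp [a] ++ [m]
      rw [sp, spass, if_neg (by
        rintro ⟨_, _, h3⟩
        exact absurd (hle a (by simp)) (by omega))]
      simp [sp, spass]
  | case3 a b t hcond ih =>
      intro m hle
      show sp (a :: b :: (t ++ [m])) = sp (a :: b :: t) ++ [m]
      rw [sp, spass, if_pos hcond, sp, spass, if_pos hcond]
      have ihh := ih m (fun x hx => hle x (by simp at hx ⊢; tauto))
      simp only [sp] at ihh ⊢
      rw [List.cons_append] at ihh ⊢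
      rw [ihh]
  | case4 a b t hcond ih =>
      intro m hle
      show sp (a :: b :: (t ++ [m])) = sp (a :: b :: t) ++ [m]
      rw [sp, spass, if_neg hcond, sp, spass, if_neg hcond]
      have ihh := ih m (fun x hx => hle x (by simp at hx ⊢; tauto))
      simp only [sp] at ihh ⊢
      rw [List.cons_append] at ihh ⊢
      rw [ihh]

lemma sp_max : ∀ (l : List Int), l ≠ [] →
    (∀ x ∈ l, PySem.Int.mod x 2 ≠ 0) →
    ∃ ys m, sp l = ys ++ [m] ∧ ∀ x ∈ l, x ≤ m := by
  intro l
  induction l using spass.induct with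
  | case1 => intro h; exact absurd rfl h
  | case2 a =>
      intro _ _
      exact ⟨[], a, by simp [sp, spass], by simp⟩
  | case3 a b t hcond ih =>
      intro _ hodd
      obtain ⟨h1, h2, hab⟩ := hcond
      obtain ⟨ys, m, hys, hm⟩ := ih (by simp)
        (fun x hx => hodd x (by simp at hx ⊢; tauto))
      refine ⟨b :: ys, m, ?_, ?_⟩
      · rw [sp, spass, if_pos ⟨h1, h2, hab⟩]
        simp only [sp] at hys
        simp [hys]
      · intro x hx
        simp at hx
        rcases hx with h | h | h
        · subst h; exact hm x (by simp)
        · subst h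
          have := hm a (by simp)
          omega
        · exact hm x (by simp [h])
  | case4 a b t hcond ih =>
      intro _ hodd
      have h1 : PySem.Int.mod a 2 ≠ 0 := hodd a (by simp)
      have h2 : PySem.Int.mod b 2 ≠ 0 := hodd b (by simp)
      have hab : ¬ a > b := fun h => hcond ⟨h1, h2, h⟩
      obtain ⟨ys, m, hys, hm⟩ := ih (by simp)
        (fun x hx => hodd x (by simp at hx ⊢; tauto))
      refine ⟨a :: ys, m, ?_, ?_⟩
      · rw [sp, spass, if_neg hcond]
        simp only [sp] at hys
        simp [hys]
      · intro x hx
        simp at hx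
        rcases hx with h | h | h
        · subst h
          have := hm b (by simp)
          omega
        · subst h; exact hm x (by simp)
        · exact hm x (by simp [h])

-- ---- iterating the pass sorts an all-odd list ----

lemma iter_append_max (j : Nat) : ∀ (ys : List Int) (m : Int),
    (∀ x ∈ ys, x ≤ m) → sp^[j] (ys ++ [m]) = sp^[j] ys ++ [m] := by
  induction j with
  | zero => intro ys m _; rfl
  | succ j ih =>
      intro ys m hle
      rw [Function.iterate_succ_apply, Function.iterate_succ_apply,
          sp_append_max ys m hle, ih]
      intro x hx
      have : x ∈ ys := (spass_perm ys).mem_iff.mp hx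
      exact hle x this

lemma iter_sorts (n : Nat) : ∀ (l : List Int),
    (∀ x ∈ l, PySem.Int.mod x 2 ≠ 0) → l.length ≤ n + 1 →
    (sp^[n] l).Pairwise (· ≤ ·) ∧ (sp^[n] l).Perm l := by
  induction n with
  | zero =>
      intro l _ hlen
      match l, hlen with
      | [], _ => exact ⟨List.Pairwise.nil, List.Perm.refl _⟩
      | [a], _ => exact ⟨by simp, List.Perm.refl _⟩
  | succ n ih =>
      intro l hodd hlen
      match l with
      | [] =>
          rw [Function.iterate_fixed sp_nil]
          exact ⟨List.Pairwise.nil, List.Perm.refl _⟩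
      | [a] =>
          rw [Function.iterate_fixed (sp_single a)]
          exact ⟨by simp, List.Perm.refl _⟩
      | a :: b :: t =>
          obtain ⟨ys, m, hys, hm⟩ := sp_max (a :: b :: t) (by simp) hodd
          have hperm : (ys ++ [m]).Perm (a :: b :: t) := hys ▸ spass_perm _
          have hodd' : ∀ x ∈ ys, PySem.Int.mod x 2 ≠ 0 := by
            intro x hx
            exact hodd x (hperm.mem_iff.mp (by simp [hx]))
          have hlen' : ys.length ≤ n + 1 := by
            have := hperm.length_eq
            simp at this hlen ⊢
            omega
          have hle : ∀ x ∈ ys, x ≤ m := by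
            intro x hx
            exact hm x (hperm.mem_iff.mp (by simp [hx]))
          obtain ⟨hpw, hpm⟩ := ih ys hodd' hlen'
          rw [Function.iterate_succ_apply, show sp (a :: b :: t) = ys ++ [m] from hys,
              iter_append_max n ys m hle]
          constructor
          · rw [List.pairwise_append]
            refine ⟨hpw, by simp, ?_⟩
            intro x hx y hy
            simp at hy
            subst hy
            exact hle x (hpm.mem_iff.mp hx)
          · exact (hpm.append_right [m]).trans hperm

lemma canon_nil : canon [] = [] := by rw [canon.eq_def]

lemma canon_cons (x : Int) (t : List Int) :
    canon (x :: t) =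
      if PySem.Int.mod x 2 ≠ 0 then
        PySem.List.sorted (x :: t.takeWhile (fun y => decide (PySem.Int.mod y 2 ≠ 0))) (fun y => y)
          ++ canon (t.dropWhile (fun y => decide (PySem.Int.mod y 2 ≠ 0)))
      else x :: canon t := by
  rw [canon.eq_def]

-- ---- iterated pass = canon ----

lemma iter_even_head (k : Nat) : ∀ (x : Int) (t : List Int),
    PySem.Int.mod x 2 = 0 → sp^[k] (x :: t) = x :: sp^[k] t := by
  induction k with
  | zero => intro x t _; rfl
  | succ k ih =>
      intro x t hx
      rw [Function.iterate_succ_apply, sp_even_head x t hx,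
          ih x (sp t) hx, Function.iterate_succ_apply]

lemma iter_append (k : Nat) : ∀ (xs rest : List Int),
    (∀ x ∈ xs, PySem.Int.mod x 2 ≠ 0) →
    (∀ e t', rest = e :: t' → PySem.Int.mod e 2 = 0) →
    sp^[k] (xs ++ rest) = sp^[k] xs ++ sp^[k] rest := by
  induction k with
  | zero => intro xs rest _ _; rfl
  | succ k ih =>
      intro xs rest hxs hr
      rw [Function.iterate_succ_apply, sp_append_even xs rest hxs hr,
          Function.iterate_succ_apply, Function.iterate_succ_apply]
      apply ih
      · intro x hx
        exact hxs x ((spass_perm xs).mem_iff.mp hx)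
      · intro e t' he
        cases hrest : rest with
        | nil => rw [hrest, sp_nil] at he; simp at he
        | cons e0 t0 =>
            have he0 : PySem.Int.mod e0 2 = 0 := hr e0 t0 hrest
            rw [hrest, sp_even_head e0 t0 he0] at he
            injection he with h1 h2
            exact h1 ▸ he0

lemma dropWhile_head_not (p : Int → Bool) : ∀ (t : List Int) (e : Int) (t' : List Int),
    t.dropWhile p = e :: t' → p e = false := by
  intro t
  induction t with
  | nil => intro e t' h; simp at h
  | cons a t ih =>
      intro e t' h
      rw [List.dropWhile_cons] at h
      split at h
      · exact ih e t' h
      · injection h with h1 _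
        subst h1
        simp_all

lemma takeWhile_all (p : Int → Bool) : ∀ (t : List Int), (∀ x ∈ t, p x = true) →
    t.takeWhile p = t ∧ t.dropWhile p = [] := by
  intro t
  induction t with
  | nil => intro _; exact ⟨rfl, rfl⟩
  | cons a t ih =>
      intro h
      have ha := h a (by simp)
      obtain ⟨h1, h2⟩ := ih (fun x hx => h x (by simp [hx]))
      rw [List.takeWhile_cons, List.dropWhile_cons]
      simp [ha, h1, h2]

lemma takeWhile_app (p : Int → Bool) (x : Int) (l' : List Int) : ∀ (t : List Int),
    (∀ y ∈ t, p y = true) → p x = false →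
    ((t ++ x :: l').takeWhile p = t ∧ (t ++ x :: l').dropWhile p = x :: l') := by
  intro t
  induction t with
  | nil => intro _ hx; simp [List.takeWhile_cons, List.dropWhile_cons, hx]
  | cons a t ih =>
      intro h hx
      have ha := h a (by simp)
      obtain ⟨h1, h2⟩ := ih (fun y hy => h y (by simp [hy])) hx
      rw [List.cons_append, List.takeWhile_cons, List.dropWhile_cons]
      simp [ha, h1, h2]

lemma iter_canon : ∀ (l : List Int) (k : Nat), l.length - 1 ≤ k → sp^[k] l = canon l := by
  intro l
  induction l using canon.induct with
  | case1 =>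
      intro k _
      rw [Function.iterate_fixed sp_nil, canon_nil]
  | case2 x t hx ih =>
      intro k hk
      set p : Int → Bool := fun y => decide (PySem.Int.mod y 2 ≠ 0) with hp
      have hall : ∀ y ∈ t.takeWhile p, PySem.Int.mod y 2 ≠ 0 := by
        intro y hy
        have := List.mem_takeWhile_imp hy
        simpa [hp] using this
      have hxs : ∀ y ∈ x :: t.takeWhile p, PySem.Int.mod y 2 ≠ 0 := by
        intro y hy
        rcases List.mem_cons.mp hy with h | h
        · subst h; exact hx
        · exact hall y h
      have hr : ∀ e t', t.dropWhile p = e :: t' → PySem.Int.mod e 2 = 0 := by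
        intro e t' he
        have := dropWhile_head_not p t e t' he
        simpa [hp] using this
      have hdecomp : x :: t = (x :: t.takeWhile p) ++ t.dropWhile p := by
        simp [List.takeWhile_append_dropWhile]
      have hlen1 : (x :: t.takeWhile p).length ≤ k + 1 := by
        have h1 : (t.takeWhile p).length ≤ t.length := (List.takeWhile_sublist _).length_le
        simp at hk ⊢
        omega
      obtain ⟨hpw, hpm⟩ := iter_sorts k (x :: t.takeWhile p) hxs hlen1
      have hsorted : PySem.List.sorted (x :: t.takeWhile p) (fun y => y)
          = sp^[k] (x :: t.takeWhile p) :=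
        PySem.List.sorted_id_eq_of_perm_of_pairwise _ _ hpm hpw
      have hlen2 : (t.dropWhile p).length - 1 ≤ k := by
        have h1 : (t.dropWhile p).length ≤ t.length := List.length_dropWhile_le _ _
        simp at hk
        omega
      have hres : canon (x :: t)
          = PySem.List.sorted (x :: t.takeWhile p) (fun y => y) ++ canon (t.dropWhile p) := by
        rw [canon_cons, if_pos hx, ← hp]
      calc sp^[k] (x :: t) = sp^[k] ((x :: t.takeWhile p) ++ t.dropWhile p) := by rw [← hdecomp]
        _ = sp^[k] (x :: t.takeWhile p) ++ sp^[k] (t.dropWhile p) := iter_append k _ _ hxs hr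
        _ = PySem.List.sorted (x :: t.takeWhile p) (fun y => y) ++ canon (t.dropWhile p) := by
              rw [← hsorted, ih k hlen2]
        _ = canon (x :: t) := by rw [hres]
  | case3 x t hx ih =>
      intro k hk
      have hx0 : PySem.Int.mod x 2 = 0 := by
        by_contra h
        exact hx h
      rw [iter_even_head k x t hx0, canon_cons, if_neg hx]
      congr 1
      apply ih
      simp at hk
      omega

-- ---- A's while loop = iterated pass ----

lemma whileA_eq : ∀ (n : Nat) (l : List Int) (z : Bool), pvWhileA n l z = sp^[n - 1] l := by
  intro n
  induction n with
  | zero => intro l z; rfl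
  | succ n ih =>
      cases n with
      | zero => intro l z; rfl
      | succ m =>
          intro l z
          show pvWhileA (m + 2) l z = sp^[m + 1] l
          simp only [pvWhileA]
          rw [passA_eq]
          by_cases hz : (z || (spass l).2) = false
          · simp only [hz]
            have hfl : (spass l).2 = false := by
              rcases Bool.or_eq_false_iff.mp hz with ⟨_, h2⟩
              exact h2
            have hfix : sp l = l := spass_noswap l hfl
            rw [if_pos trivial]
            rw [Function.iterate_fixed hfix]
            exact hfix
          · simp only [hz]
            rw [if_neg (by simp_all)]
            rw [ih]
            exact (Function.iterate_succ_apply sp m l).symm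

-- ---- B = canon ----

lemma canon_allodd (run : List Int) (h : ∀ x ∈ run, PySem.Int.mod x 2 ≠ 0) :
    canon run = PySem.List.sorted run (fun y => y) := by
  cases run with
  | nil =>
      rw [canon_nil, PySem.List.sorted_eq_self_of_pairwise _ _ List.Pairwise.nil]
  | cons r rt =>
      have hr : PySem.Int.mod r 2 ≠ 0 := h r (by simp)
      obtain ⟨h1, h2⟩ := takeWhile_all (fun y => decide (PySem.Int.mod y 2 ≠ 0)) rt
        (fun x hx => decide_eq_true (h x (List.mem_cons_of_mem _ hx)))
      rw [canon_cons, if_pos hr, h1, h2]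
      simp [canon_nil]

lemma canon_run_even (run : List Int) (x : Int) (l' : List Int)
    (h : ∀ y ∈ run, PySem.Int.mod y 2 ≠ 0) (hx : PySem.Int.mod x 2 = 0) :
    canon (run ++ x :: l') = PySem.List.sorted run (fun y => y) ++ x :: canon l' := by
  cases run with
  | nil =>
      rw [List.nil_append, canon_cons, if_neg (fun h => h hx),
          PySem.List.sorted_eq_self_of_pairwise _ _ List.Pairwise.nil]
      simp
  | cons r rt =>
      have hr : PySem.Int.mod r 2 ≠ 0 := h r (by simp)
      obtain ⟨h1, h2⟩ := takeWhile_app (fun y => decide (PySem.Int.mod y 2 ≠ 0)) x l' rt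
        (fun y hy => decide_eq_true (h y (List.mem_cons_of_mem _ hy)))
        (decide_eq_false (fun hc => hc hx))
      rw [List.cons_append, canon_cons, if_pos hr, h1, h2, canon_cons, if_neg (fun hc => hc hx)]

lemma foldB_eq : ∀ (l : List Int) (out run : List Int),
    (∀ x ∈ run, PySem.Int.mod x 2 ≠ 0) →
    (l.foldl pvStepB (out, run)).1
        ++ PySem.List.sorted (l.foldl pvStepB (out, run)).2 (fun y => y)
      = out ++ canon (run ++ l) := by
  intro l
  induction l with
  | nil =>
      intro out run h
      simp only [List.foldl_nil, List.append_nil]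
      rw [canon_allodd run h]
  | cons x l' ih =>
      intro out run h
      rw [List.foldl_cons]
      by_cases hx : PySem.Int.mod x 2 ≠ 0
      · rw [show pvStepB (out, run) x = (out, run ++ [x]) from by rw [pvStepB, if_pos hx]]
        rw [ih out (run ++ [x]) (by
          intro y hy
          rcases List.mem_append.mp hy with hy | hy
          · exact h y hy
          · simp at hy; subst hy; exact hx)]
        simp
      · have hx0 : PySem.Int.mod x 2 = 0 := by by_contra hc; exact hx hc
        rw [show pvStepB (out, run) x
              = (out ++ PySem.List.sorted run (fun y => y) ++ [x], []) from by
            rw [pvStepB, if_neg hx]]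
        rw [ih _ [] (by simp)]
        rw [canon_run_even run x l' h hx0]
        simp

lemma alt_eq_canon (l : List Int) : sortowanieBombelkowe_alt l = canon l := by
  rw [sortowanieBombelkowe_alt]
  have := foldB_eq l [] [] (by simp)
  simpa using this

-- ===== VERDICT (by name: the statement is the Claim_ definition above) =====
theorem sortowanieBombelkowe_spec : Claim_equal_sortowanieBombelkowe := by
  intro lista _
  unfold Spec_sortowanieBombelkowe
  rw [alt_eq_canon]
  show sortowanieBombelkowe lista = canon lista
  rw [sortowanieBombelkowe, whileA_eq, iter_canon]
  omega
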